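-- pv_equiv track=rewrite | github.com/meridianlabs-ai/inspect_flow | src/inspect_flow/_types/type_gen.py | convert_multiline_docstrings_to_single_line
-- ===== SOURCE A (Python) =====
-- def convert_multiline_docstrings_to_single_line(lines: list[str]) -> list[str]:
--     """Convert multi-line docstrings to single-line format when they contain only one line of text."""
--     result: list[str] = []
--     in_docstring = False
--     docstring_lines: list[str] = []
--     docstring_indent = ""
--     original_lines = []
--
--     for line in lines:
--         stripped = line.strip()
--
--         # Check if this line starts a docstring
--         if not in_docstring and stripped.startswith('"""'):
--             # Check if it's already a single-line docstring
--             if stripped.endswith('"""') and len(stripped) > 6: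
--                 result.append(line)
--                 continue
--             # Start collecting a multi-line docstring
--             in_docstring = True
--             original_lines = [line]
--             docstring_indent = line[: len(line) - len(line.lstrip())]
--             docstring_lines = [stripped[3:]]  # Remove opening """
--         elif in_docstring:
--             # Check if this line ends the docstring
--             if stripped.endswith('"""'):
--                 # Add the final content (without closing """)
--                 content = stripped[:-3].strip()
--                 if content:
--                     docstring_lines.append(content)
--
--                 # Filter out empty lines
--                 non_empty_lines = [line for line in docstring_lines if line.strip()]
--
--                 # Only convert to single-line if there's exactly one line of content
--                 if len(non_empty_lines) == 1:
--                     full_docstring = non_empty_lines[0].strip()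
--                     result.append(f'{docstring_indent}"""{full_docstring}"""\n')
--                 else:
--                     result.extend(original_lines)
--                     result.append(line)
--
--                 in_docstring = False
--             else:
--                 # Continue collecting docstring content
--                 original_lines.append(line)
--                 docstring_lines.append(line)
--         else:
--             result.append(line)
--
--     return result
-- ===== SOURCE B (Python) =====
-- def _find_closer(lines, j):
--     """Index of the first line at or after j whose strip ends with triple-quote, else None."""
--     while j < len(lines):
--         if lines[j].strip().endswith('"""'):
--             return j
--         j += 1
--     return None
--
--
-- def convert_multiline_docstrings_to_single_line(lines: list[str]) -> list[str]:
--     """Convert multi-line docstrings to single-line format when they contain only one line of text."""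
--     result: list[str] = []
--     i = 0
--     n = len(lines)
--     while i < n:
--         line = lines[i]
--         stripped = line.strip()
--         if not stripped.startswith('"""') or (stripped.endswith('"""') and len(stripped) > 6):
--             # ordinary line, or an already single-line docstring
--             result.append(line)
--             i += 1
--             continue
--         # opener of a multi-line docstring: scan ahead for the closing line
--         k = _find_closer(lines, i + 1)
--         if k is None:
--             break  # unterminated docstring contributes nothing
--         body = lines[i + 1:k]
--         closer = lines[k]
--         contents = [stripped[3:]] + body
--         closing_content = closer.strip()[:-3].strip()
--         if closing_content:
--             contents.append(closing_content)
--         non_empty = [c for c in contents if c.strip()]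
--         if len(non_empty) == 1:
--             indent = line[: len(line) - len(line.lstrip())]
--             result.append(f'{indent}"""{non_empty[0].strip()}"""\n')
--         else:
--             result.extend(lines[i:k + 1])
--         i = k + 1
--     return result
-- ===== Notes on version B (the rewrite author's own statement) =====
-- stated objective: simpler
-- what changed: Replaces A's persistent in_docstring flag machine with four accumulators by an index-based scan that, at each docstring opener, looks ahead for the closing line and processes the whole block at once with a slice, keeping no cross-iteration state.
import Mathlib
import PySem

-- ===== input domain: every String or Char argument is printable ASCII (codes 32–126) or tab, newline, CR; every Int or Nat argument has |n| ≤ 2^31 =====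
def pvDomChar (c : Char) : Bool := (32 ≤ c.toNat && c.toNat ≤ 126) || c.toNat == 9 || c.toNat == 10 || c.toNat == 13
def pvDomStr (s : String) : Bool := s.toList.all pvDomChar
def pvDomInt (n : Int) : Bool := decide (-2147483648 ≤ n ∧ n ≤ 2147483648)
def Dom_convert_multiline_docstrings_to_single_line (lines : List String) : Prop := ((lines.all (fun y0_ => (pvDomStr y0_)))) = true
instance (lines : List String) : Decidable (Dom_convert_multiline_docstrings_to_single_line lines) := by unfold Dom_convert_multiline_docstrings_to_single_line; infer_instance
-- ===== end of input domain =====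

-- B replaces A's persistent in_docstring flag machine (four cross-iteration accumulators)
-- by an index-based scan that processes each docstring block at once via a look-ahead for
-- the closing line; objective: simpler (same behaviour, same cost).

-- ===== PORT A =====

def pvQ3 : String := "\"\"\""

-- one iteration of A's for-loop;
-- state: (result, in_docstring, docstring_lines, docstring_indent, original_lines)
def pvStepA (st : List String × Bool × List String × String × List String) (line : String) :
    List String × Bool × List String × String × List String :=
  let (result, inDoc, dls, ind, orig) := st
  let stripped := PySem.Str.strip line
  if !inDoc && PySem.Str.startswith stripped pvQ3 then
    if PySem.Str.endswith stripped pvQ3 && decide (PySem.Str.len stripped > 6) then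
      (result ++ [line], inDoc, dls, ind, orig)
    else
      (result, true,
       [PySem.Str.slice stripped (some 3) none],
       PySem.Str.slice line none (some (PySem.Str.len line - PySem.Str.len (PySem.Str.lstrip line))),
       [line])
  else if inDoc then
    if PySem.Str.endswith stripped pvQ3 then
      let content := PySem.Str.strip (PySem.Str.slice stripped none (some (-3)))
      let dls' := if PySem.Str.len content != 0 then dls ++ [content] else dls
      let ne := dls'.filter (fun l => PySem.Str.len (PySem.Str.strip l) != 0)
      if ne.length = 1 then
        -- non_empty_lines[0]: this branch guarantees the list has exactly one element,
        -- so the Python indexing cannot raise; ported as pyGet? defaulted (exact here)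
        (result ++ [ind ++ pvQ3 ++ PySem.Str.strip ((PySem.List.pyGet? ne 0).getD "") ++ pvQ3 ++ "\n"],
         false, dls', ind, orig)
      else
        (result ++ orig ++ [line], false, dls', ind, orig)
    else
      (result, inDoc, dls ++ [line], ind, orig ++ [line])
  else
    (result ++ [line], inDoc, dls, ind, orig)

def convert_multiline_docstrings_to_single_line (lines : List String) : List String :=
  (lines.foldl pvStepA ([], false, [], "", [])).1

-- ===== PORT B =====

-- port of Source B's _find_closer plus the slices lines[i+1:k], lines[k], lines[k+1:]:
-- (body before the first closing line, the closing line, the rest); none if no closer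
def pvSplitCloser : List String → Option (List String × String × List String)
  | [] => none
  | l :: ls =>
    if PySem.Str.endswith (PySem.Str.strip l) pvQ3 then some ([], l, ls)
    else
      match pvSplitCloser ls with
      | none => none
      | some (b, c, r) => some (l :: b, c, r)

theorem pvSplitCloser_length {ls : List String} {b : List String} {c : String} {r : List String}
    (h : pvSplitCloser ls = some (b, c, r)) : r.length < ls.length := by
  induction ls generalizing b c r with
  | nil => simp [pvSplitCloser] at h
  | cons l tl ih =>
    simp only [pvSplitCloser] at h
    by_cases hc : PySem.Str.endswith (PySem.Str.strip l) pvQ3 = true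
    · rw [if_pos hc] at h
      cases h
      simp
    · rw [if_neg hc] at h
      cases hs : pvSplitCloser tl with
      | none => rw [hs] at h; cases h
      | some v =>
        obtain ⟨b', c', r'⟩ := v
        rw [hs] at h
        cases h
        exact Nat.lt_succ_of_lt (ih hs)

-- Source B's while loop over i, as recursion on the remaining lines
def pvAltGo : List String → List String
  | [] => []
  | line :: rest =>
    let stripped := PySem.Str.strip line
    if PySem.Str.startswith stripped pvQ3 &&
       !(PySem.Str.endswith stripped pvQ3 && decide (PySem.Str.len stripped > 6)) then
      match h : pvSplitCloser rest with
      | none => []   -- unterminated docstring: the loop breaks, nothing more is emitted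
      | some (body, closer, rest') =>
        let contents := PySem.Str.slice stripped (some 3) none :: body
        let closingContent := PySem.Str.strip (PySem.Str.slice (PySem.Str.strip closer) none (some (-3)))
        let contents' := if PySem.Str.len closingContent != 0 then contents ++ [closingContent] else contents
        let ne := contents'.filter (fun c => PySem.Str.len (PySem.Str.strip c) != 0)
        (if ne.length = 1 then
          let ind := PySem.Str.slice line none (some (PySem.Str.len line - PySem.Str.len (PySem.Str.lstrip line)))
          [ind ++ pvQ3 ++ PySem.Str.strip ((PySem.List.pyGet? ne 0).getD "") ++ pvQ3 ++ "\n"]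
         else (line :: body) ++ [closer]) ++ pvAltGo rest'
    else line :: pvAltGo rest
termination_by ls => ls.length
decreasing_by
  · exact Nat.lt_succ_of_lt (pvSplitCloser_length h)
  · simp

def convert_multiline_docstrings_to_single_line_alt (lines : List String) : List String :=
  pvAltGo lines

-- ===== PRECONDITION & SPEC =====
def Spec_convert_multiline_docstrings_to_single_line (lines : List String) (out : List String) : Prop := out = convert_multiline_docstrings_to_single_line_alt lines
instance (lines : List String) (out : List String) : Decidable (Spec_convert_multiline_docstrings_to_single_line lines out) := by unfold Spec_convert_multiline_docstrings_to_single_line; infer_instance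

-- ===== CLAIM (what is proved, stated in full; the proofs are below) =====
def Claim_equal_convert_multiline_docstrings_to_single_line : Prop := ∀ (lines : List String), Dom_convert_multiline_docstrings_to_single_line lines → Spec_convert_multiline_docstrings_to_single_line lines (convert_multiline_docstrings_to_single_line lines)

-- ===== LEMMAS AND PROOFS =====

-- unfolding equations for A's step function, one per branch of the Python loop body

theorem pvStepA_open (res dls : List String) (ind : String) (orig : List String) (l : String)
    (h1 : PySem.Str.startswith (PySem.Str.strip l) pvQ3 = true)
    (h2 : (PySem.Str.endswith (PySem.Str.strip l) pvQ3 && decide (PySem.Str.len (PySem.Str.strip l) > 6)) = false) :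
    pvStepA (res, false, dls, ind, orig) l =
    (res, true, [PySem.Str.slice (PySem.Str.strip l) (some 3) none],
     PySem.Str.slice l none (some (PySem.Str.len l - PySem.Str.len (PySem.Str.lstrip l))), [l]) := by
  simp only [pvStepA, Bool.not_false, Bool.true_and, h1, h2, Bool.false_eq_true, reduceIte]


theorem pvStepA_single (res dls : List String) (ind : String) (orig : List String) (l : String)
    (h1 : PySem.Str.startswith (PySem.Str.strip l) pvQ3 = true)
    (h2 : (PySem.Str.endswith (PySem.Str.strip l) pvQ3 && decide (PySem.Str.len (PySem.Str.strip l) > 6)) = true) :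
    pvStepA (res, false, dls, ind, orig) l = (res ++ [l], false, dls, ind, orig) := by
  simp only [pvStepA, Bool.not_false, Bool.true_and, h1, h2, Bool.false_eq_true, reduceIte]


theorem pvStepA_plain (res dls : List String) (ind : String) (orig : List String) (l : String)
    (h1 : PySem.Str.startswith (PySem.Str.strip l) pvQ3 = false) :
    pvStepA (res, false, dls, ind, orig) l = (res ++ [l], false, dls, ind, orig) := by
  simp only [pvStepA, Bool.not_false, Bool.true_and, h1, Bool.false_eq_true, reduceIte]


theorem pvStepA_body (res dls : List String) (ind : String) (orig : List String) (l : String)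
    (hc : PySem.Str.endswith (PySem.Str.strip l) pvQ3 = false) :
    pvStepA (res, true, dls, ind, orig) l = (res, true, dls ++ [l], ind, orig ++ [l]) := by
  simp only [pvStepA, Bool.not_true, Bool.false_and, hc, Bool.false_eq_true, reduceIte]


theorem pvStepA_close (res dls : List String) (ind : String) (orig : List String) (l : String)
    (hc : PySem.Str.endswith (PySem.Str.strip l) pvQ3 = true) :
    pvStepA (res, true, dls, ind, orig) l =
    (let content := PySem.Str.strip (PySem.Str.slice (PySem.Str.strip l) none (some (-3)))
     let dls' := if PySem.Str.len content != 0 then dls ++ [content] else dls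
     let ne := dls'.filter (fun x => PySem.Str.len (PySem.Str.strip x) != 0)
     ((if ne.length = 1 then
        res ++ [ind ++ pvQ3 ++ PySem.Str.strip ((PySem.List.pyGet? ne 0).getD "") ++ pvQ3 ++ "\n"]
       else res ++ orig ++ [l]),
      false, dls', ind, orig)) := by
  simp only [pvStepA, Bool.not_true, Bool.false_and, hc, Bool.false_eq_true, reduceIte]
  split_ifs <;> rfl


theorem pvAltGo_cons_noopen (line : String) (rest : List String)
    (hopen : (PySem.Str.startswith (PySem.Str.strip line) pvQ3 &&
      !(PySem.Str.endswith (PySem.Str.strip line) pvQ3 && decide (PySem.Str.len (PySem.Str.strip line) > 6))) = false) :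
    pvAltGo (line :: rest) = line :: pvAltGo rest := by
  rw [pvAltGo]
  simp only [hopen, Bool.false_eq_true, reduceIte]

theorem pvAltGo_cons_open_none (line : String) (rest : List String)
    (hopen : (PySem.Str.startswith (PySem.Str.strip line) pvQ3 &&
      !(PySem.Str.endswith (PySem.Str.strip line) pvQ3 && decide (PySem.Str.len (PySem.Str.strip line) > 6))) = true)
    (h : pvSplitCloser rest = none) :
    pvAltGo (line :: rest) = [] := by
  rw [pvAltGo]
  simp only [hopen, reduceIte]
  split
  · rfl
  · rename_i b2 c2 r2 heq
    rw [h] at heq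
    exact absurd heq (by simp)

theorem pvAltGo_cons_open_some (line : String) (rest body : List String) (closer : String) (rest' : List String)
    (hopen : (PySem.Str.startswith (PySem.Str.strip line) pvQ3 &&
      !(PySem.Str.endswith (PySem.Str.strip line) pvQ3 && decide (PySem.Str.len (PySem.Str.strip line) > 6))) = true)
    (h : pvSplitCloser rest = some (body, closer, rest')) :
    pvAltGo (line :: rest) =
    (let contents := PySem.Str.slice (PySem.Str.strip line) (some 3) none :: body
     let closingContent := PySem.Str.strip (PySem.Str.slice (PySem.Str.strip closer) none (some (-3)))
     let contents' := if PySem.Str.len closingContent != 0 then contents ++ [closingContent] else contents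
     let ne := contents'.filter (fun c => PySem.Str.len (PySem.Str.strip c) != 0)
     (if ne.length = 1 then
        [PySem.Str.slice line none (some (PySem.Str.len line - PySem.Str.len (PySem.Str.lstrip line))) ++
          pvQ3 ++ PySem.Str.strip ((PySem.List.pyGet? ne 0).getD "") ++ pvQ3 ++ "\n"]
      else (line :: body) ++ [closer]) ++ pvAltGo rest') := by
  rw [pvAltGo]
  simp only [hopen, reduceIte]
  split
  · rename_i heq
    rw [h] at heq
    exact absurd heq (by simp)
  · rename_i b2 c2 r2 heq
    rw [h] at heq
    cases heq
    split_ifs <;> rfl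

-- A's fold from an in-docstring state, characterised by pvSplitCloser on the remaining lines
theorem pvFoldA_inDoc (ls : List String) :
    ∀ (res dls : List String) (ind : String) (orig : List String),
    (List.foldl pvStepA (res, true, dls, ind, orig) ls).1 =
    match pvSplitCloser ls with
    | none => res
    | some (body, closer, rest) =>
      let content := PySem.Str.strip (PySem.Str.slice (PySem.Str.strip closer) none (some (-3)))
      let dls' := if PySem.Str.len content != 0 then (dls ++ body) ++ [content] else dls ++ body
      let ne := dls'.filter (fun x => PySem.Str.len (PySem.Str.strip x) != 0)
      let res' := if ne.length = 1 then
          res ++ [ind ++ pvQ3 ++ PySem.Str.strip ((PySem.List.pyGet? ne 0).getD "") ++ pvQ3 ++ "\n"]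
        else (res ++ (orig ++ body)) ++ [closer]
      (List.foldl pvStepA (res', false, dls', ind, orig ++ body) rest).1 := by
  induction ls with
  | nil => intro res dls ind orig; simp [pvSplitCloser]
  | cons l tl ih =>
    intro res dls ind orig
    by_cases hc : PySem.Str.endswith (PySem.Str.strip l) pvQ3 = true
    · rw [List.foldl_cons, pvStepA_close res dls ind orig l hc]
      simp only [pvSplitCloser, hc, if_true]
      simp only [List.append_nil, List.append_assoc]
    · rw [Bool.not_eq_true] at hc
      rw [List.foldl_cons, pvStepA_body res dls ind orig l hc, ih]
      rw [pvSplitCloser, if_neg (by simpa using hc)]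
      cases hs : pvSplitCloser tl with
      | none => rfl
      | some v =>
        obtain ⟨b', c', r'⟩ := v
        simp only [List.append_assoc, List.singleton_append]

-- A's fold from a not-in-docstring state equals B's block scan
theorem pvFoldA_notDoc (ls : List String) :
    ∀ (res dls : List String) (ind : String) (orig : List String),
    (List.foldl pvStepA (res, false, dls, ind, orig) ls).1 = res ++ pvAltGo ls := by
  induction ls using pvAltGo.induct with
  | case1 =>
    intro res dls ind orig
    rw [pvAltGo]
    simp only [List.foldl_nil, List.append_nil]
  | case2 line rest stripped hopen h =>
    intro res dls ind orig
    have hopen' := hopen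
    rw [Bool.and_eq_true] at hopen'
    obtain ⟨h1, h2⟩ := hopen'
    rw [Bool.not_eq_true'] at h2
    rw [List.foldl_cons, pvStepA_open res dls ind orig line h1 h2, pvFoldA_inDoc]
    simp only [h]
    rw [pvAltGo_cons_open_none line rest hopen h]
    simp only [List.append_nil]
  | case3 line rest stripped hopen body closer rest' h ih =>
    intro res dls ind orig
    have hopen' := hopen
    rw [Bool.and_eq_true] at hopen'
    obtain ⟨h1, h2⟩ := hopen'
    rw [Bool.not_eq_true'] at h2
    rw [List.foldl_cons, pvStepA_open res dls ind orig line h1 h2, pvFoldA_inDoc]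
    simp only [h]
    rw [ih, pvAltGo_cons_open_some line rest body closer rest' hopen h]
    simp only [List.append_assoc, List.cons_append, List.nil_append]
    split_ifs <;> simp only [List.append_assoc, List.cons_append, List.nil_append]
  | case4 line rest stripped hopen ih =>
    intro res dls ind orig
    rw [Bool.not_eq_true] at hopen
    rw [pvAltGo_cons_noopen line rest hopen, List.foldl_cons]
    by_cases h1 : PySem.Str.startswith (PySem.Str.strip line) pvQ3 = true
    · have h2 : (PySem.Str.endswith (PySem.Str.strip line) pvQ3 && decide (PySem.Str.len (PySem.Str.strip line) > 6)) = true := by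
        by_contra hq
        rw [Bool.not_eq_true] at hq
        rw [h1, hq] at hopen
        simp at hopen
      rw [pvStepA_single res dls ind orig line h1 h2, ih]
      simp only [List.append_assoc, List.singleton_append]
    · rw [Bool.not_eq_true] at h1
      rw [pvStepA_plain res dls ind orig line h1, ih]
      simp only [List.append_assoc, List.singleton_append]

-- ===== VERDICT (by name: the statement is the Claim_ definition above) =====
theorem convert_multiline_docstrings_to_single_line_spec : Claim_equal_convert_multiline_docstrings_to_single_line := by
  intro lines _
  unfold Spec_convert_multiline_docstrings_to_single_line
  unfold convert_multiline_docstrings_to_single_line convert_multiline_docstrings_to_single_line_alt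
  rw [pvFoldA_notDoc]
  simp only [List.nil_append]
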